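-- pv_equiv track=rewrite | github.com/KyoungSoo1996/python-coding-practice | python project/file_examples/test6.py | solution
-- ===== SOURCE A (Python) =====
-- def solution(phone_number):
--     data = []
--     count = 0
--     for num in str(phone_number):
--         if(count < len(str(phone_number)) - 4):
--             data.insert(len(str(phone_number)), '*')
--         else:
--             data.insert(len(str(phone_number)), num)
--         count += 1
--     answer = data
--     return answer
-- ===== SOURCE B (Python) =====
-- def solution(phone_number):
--     s = str(phone_number)
--     return ['*'] * (len(s) - 4) + list(s[-4:])
-- ===== Notes on version B (the rewrite author's own statement) =====
-- stated objective: simpler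
-- what changed: Replaces the per-character counting loop (with its insert-past-the-end appends) by a direct closed-form construction: a replicated block of stars concatenated with the last-4 slice.
import Mathlib
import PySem

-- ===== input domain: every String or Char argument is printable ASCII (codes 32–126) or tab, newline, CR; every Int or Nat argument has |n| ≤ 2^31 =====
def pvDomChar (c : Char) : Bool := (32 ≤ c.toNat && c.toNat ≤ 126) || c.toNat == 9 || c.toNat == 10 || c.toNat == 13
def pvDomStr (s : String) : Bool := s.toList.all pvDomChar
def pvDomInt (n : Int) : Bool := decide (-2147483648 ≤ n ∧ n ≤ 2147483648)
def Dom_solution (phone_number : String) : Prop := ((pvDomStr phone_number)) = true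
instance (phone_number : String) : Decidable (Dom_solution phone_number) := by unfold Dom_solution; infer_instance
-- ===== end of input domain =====

-- B replaces A's per-character counting loop by a closed form: replicate (n-4) stars ++ the last-4 slice (simpler).


-- ===== PORT A =====
-- A: for each char, append '*' while count < len-4, else append the char (insert at index len ≥ current length = append).
def solution (phone_number : String) : List String :=
  let cs := phone_number.toList
  let n : Int := (cs.length : Int)
  (cs.foldl (fun (acc : List String × Int) num =>
      let data := if acc.2 < n - 4 then acc.1 ++ ["*"] else acc.1 ++ [num.toString]
      (data, acc.2 + 1)) ([], 0)).1

-- ===== PORT B =====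
-- B: ['*'] * (len(s) - 4) + list(s[-4:])
def solution_alt (phone_number : String) : List String :=
  let cs := phone_number.toList
  List.replicate (cs.length - 4) "*" ++ (PySem.List.slice cs (some (-4)) none).map Char.toString

-- ===== PRECONDITION & SPEC =====
def Spec_solution (phone_number : String) (out : List String) : Prop := out = solution_alt phone_number
instance (phone_number : String) (out : List String) : Decidable (Spec_solution phone_number out) := by unfold Spec_solution; infer_instance

-- ===== CLAIM (what is proved, stated in full; the proofs are below) =====
def Claim_equal_solution : Prop := ∀ (phone_number : String), Dom_solution phone_number → Spec_solution phone_number (solution phone_number)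

-- ===== LEMMAS AND PROOFS =====

-- A's loop, with the accumulated list factored out.
theorem solution_loop (n : Int) (cs : List Char) :
    ∀ (count : Int) (data : List String),
      (cs.foldl (fun (acc : List String × Int) num =>
        let d := if acc.2 < n - 4 then acc.1 ++ ["*"] else acc.1 ++ [num.toString]
        (d, acc.2 + 1)) (data, count)).1
      = data ++ List.replicate (min (n - 4 - count).toNat cs.length) "*"
          ++ (cs.drop (n - 4 - count).toNat).map Char.toString := by
  induction cs with
  | nil => intro count data; simp
  | cons c cs ih =>
    intro count data
    simp only [List.foldl_cons]
    rw [ih (count + 1)]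
    by_cases h : count < n - 4
    · have hk : (n - 4 - count).toNat = (n - 4 - (count + 1)).toNat + 1 := by omega
      simp only [if_pos h, hk]
      rw [List.drop_succ_cons]
      have : min ((n - 4 - (count + 1)).toNat + 1) (c :: cs).length
          = min (n - 4 - (count + 1)).toNat cs.length + 1 := by
        simp [List.length_cons]
      rw [this, List.replicate_succ]
      simp [List.append_assoc]
    · have hk : (n - 4 - count).toNat = 0 := by omega
      have hk' : (n - 4 - (count + 1)).toNat = 0 := by omega
      simp [if_neg h, hk, hk']

-- ===== VERDICT (by name: the statement is the Claim_ definition above) =====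
theorem solution_spec : Claim_equal_solution := by
  intro s _
  unfold Spec_solution solution solution_alt
  set cs := s.toList with hcs
  simp only
  rw [solution_loop ((cs.length : Int)) cs 0 []]
  rcases Nat.lt_or_ge cs.length 4 with h4 | h4
  · have h0 : ((cs.length : Int) - 4 - 0).toNat = 0 := by omega
    have hr : cs.length - 4 = 0 := by omega
    have hc : ((cs.length : Int) - 4).toNat = 0 := by omega
    rw [PySem.List.slice_from_neg_ofNat cs 4 (by omega)]
    simp [hr, hc]
  · have h0 : ((cs.length : Int) - 4 - 0).toNat = cs.length - 4 := by omega
    have hc : ((cs.length : Int) - 4).toNat = cs.length - 4 := by omega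
    rw [PySem.List.slice_from_neg_ofNat cs 4 (by omega)]
    simp [hc]
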